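-- pv_equiv track=rewrite | github.com/MichaelOgunsanmi/Algorithms-and-Data-Structures | Examples/Matrix/toeplitzMatrix.py | convertSingleToDiagonalMatrix
-- ===== SOURCE A (Python) =====
-- def convertSingleToDiagonalMatrix(singleMatrix):
--     matrixSize = int((len(singleMatrix) + 1 ) / 2)
--     output = [[0] * matrixSize for i in range(matrixSize)]
--
--     i = 0
--     while i < matrixSize:
--         j = 0
--         while j < matrixSize:
--             if i <= j:
--                 output[i][j] = singleMatrix[j-i]
--             else:
--                 output[i][j] = singleMatrix[matrixSize - 1 + i -j]
--             j += 1
--         i += 1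
--
--     return output
-- ===== SOURCE B (Python) =====
-- def convertSingleToDiagonalMatrix(singleMatrix):
--     matrixSize = (len(singleMatrix) + 1) // 2
--     # build row i directly from two slices: reversed sub-diagonal prefix + main/super-diagonal suffix
--     return [singleMatrix[matrixSize:matrixSize + i][::-1] + singleMatrix[:matrixSize - i]
--             for i in range(matrixSize)]
-- ===== Notes on version B (the rewrite author's own statement) =====
-- stated objective: simpler
-- what changed: Replaces A's nested per-cell while loops with an i<=j branch by a list comprehension that builds each row directly as reversed(singleMatrix[n:n+i]) + singleMatrix[:n-i] (two slices per row, no per-cell indexing or branching).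
import Mathlib
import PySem

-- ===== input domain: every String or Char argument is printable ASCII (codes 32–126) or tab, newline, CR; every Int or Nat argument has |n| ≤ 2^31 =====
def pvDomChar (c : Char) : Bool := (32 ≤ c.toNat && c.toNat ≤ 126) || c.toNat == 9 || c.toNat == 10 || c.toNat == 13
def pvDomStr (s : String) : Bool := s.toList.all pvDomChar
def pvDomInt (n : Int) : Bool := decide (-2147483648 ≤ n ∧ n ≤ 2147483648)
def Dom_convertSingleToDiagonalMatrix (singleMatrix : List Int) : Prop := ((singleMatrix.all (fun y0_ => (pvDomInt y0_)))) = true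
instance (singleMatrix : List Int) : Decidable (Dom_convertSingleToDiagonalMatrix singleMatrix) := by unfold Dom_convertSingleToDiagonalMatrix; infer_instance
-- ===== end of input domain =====

-- B builds each row from two list slices (reversed sub-diagonal prefix ++ first-row prefix)
-- instead of A's nested per-cell loops with a branch: simpler decomposition, same exact values.

-- ===== PORT A =====
-- inner while loop: sets output[i][j] for j = j..matrixSize-1 in the row (each Python row is a
-- distinct list, so mutating output[i] in place is row-local).  singleMatrix[...] indices are
-- always in range here, so pyGetD is exact (Python never raises).
def pvAInner (s : List Int) (n i j : Nat) (row : List Int) : List Int :=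
  if _h : j < n then
    pvAInner s n i (j+1) (row.set j
      (if i ≤ j then PySem.List.pyGetD s ((j:Int) - (i:Int)) 0
       else PySem.List.pyGetD s ((n:Int) - 1 + (i:Int) - (j:Int)) 0))
  else row
termination_by n - j

-- outer while loop over i
def pvAOuter (s : List Int) (n i : Nat) (out : List (List Int)) : List (List Int) :=
  if _h : i < n then
    pvAOuter s n (i+1) (out.set i (pvAInner s n i 0 (out.getD i [])))
  else out
termination_by n - i

def convertSingleToDiagonalMatrix (singleMatrix : List Int) : List (List Int) :=
  -- int((len+1)/2) = (len+1) // 2 for nonnegative lengths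
  let matrixSize := (singleMatrix.length + 1) / 2
  pvAOuter singleMatrix matrixSize 0 (List.replicate matrixSize (List.replicate matrixSize 0))

-- ===== PORT B =====
def convertSingleToDiagonalMatrix_alt (singleMatrix : List Int) : List (List Int) :=
  let matrixSize := (singleMatrix.length + 1) / 2
  -- [singleMatrix[n:n+i][::-1] + singleMatrix[:n-i] for i in range(n)]  ([::-1] = reverse)
  (List.range matrixSize).map (fun (i : Nat) =>
    (PySem.List.slice singleMatrix (some (matrixSize : Int)) (some ((matrixSize : Int) + (i : Int)))).reverse ++
    PySem.List.slice singleMatrix none (some ((matrixSize : Int) - (i : Int))))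

-- ===== PRECONDITION & SPEC =====
def Spec_convertSingleToDiagonalMatrix (singleMatrix : List Int) (out : List (List Int)) : Prop := out = convertSingleToDiagonalMatrix_alt singleMatrix
instance (singleMatrix : List Int) (out : List (List Int)) : Decidable (Spec_convertSingleToDiagonalMatrix singleMatrix out) := by unfold Spec_convertSingleToDiagonalMatrix; infer_instance

-- ===== CLAIM (what is proved, stated in full; the proofs are below) =====
def Claim_equal_convertSingleToDiagonalMatrix : Prop := ∀ (singleMatrix : List Int), Dom_convertSingleToDiagonalMatrix singleMatrix → Spec_convertSingleToDiagonalMatrix singleMatrix (convertSingleToDiagonalMatrix singleMatrix)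

-- ===== LEMMAS AND PROOFS =====

-- the value A writes into cell (i, j)
def pvVal (s : List Int) (n i j : Nat) : Int :=
  if i ≤ j then PySem.List.pyGetD s ((j:Int) - (i:Int)) 0
  else PySem.List.pyGetD s ((n:Int) - 1 + (i:Int) - (j:Int)) 0

theorem pvAInner_eq (s : List Int) (n i : Nat) :
    ∀ d j row, n - j = d → row.length = n → j ≤ n →
      pvAInner s n i j row = row.take j ++ (List.range d).map (fun k => pvVal s n i (j + k)) := by
  intro d
  induction d with
  | zero =>
    intro j row hd hlen hj
    have hjn : j = n := by omega
    rw [pvAInner]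
    simp [hjn, List.take_of_length_le (le_of_eq hlen)]
  | succ d ih =>
    intro j row hd hlen hj
    have hjn : j < n := by omega
    rw [pvAInner]
    simp only [hjn, dif_pos]
    rw [ih (j+1) _ (by omega) (by simp [hlen]) (by omega)]
    have hset : row.set j (pvVal s n i j) = row.take j ++ pvVal s n i j :: row.drop (j+1) := by
      rw [List.set_eq_take_append_cons_drop, if_pos (by omega)]
    show (row.set j (pvVal s n i j)).take (j+1) ++ _ = _
    rw [hset]
    have htake : (row.take j ++ pvVal s n i j :: row.drop (j+1)).take (j+1)
        = row.take j ++ [pvVal s n i j] := by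
      have hlt : (row.take j).length = j := by
        simp [List.length_take, hlen]; omega
      rw [show j + 1 = (row.take j).length + 1 by omega, List.take_append]
      simp
    rw [htake, List.range_succ_eq_map, List.map_cons, List.map_map]
    simp only [List.append_assoc, List.cons_append, List.nil_append, Nat.add_zero]
    congr 2
    apply List.map_congr_left
    intro k _
    simp only [Function.comp]
    congr 1
    omega

theorem pvAOuter_eq (s : List Int) (n : Nat) :
    ∀ d i out, n - i = d → out.length = n → (∀ r ∈ out, r.length = n) → i ≤ n →
      pvAOuter s n i out
        = out.take i ++ (List.range d).map (fun k => (List.range n).map (pvVal s n (i + k))) := by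
  intro d
  induction d with
  | zero =>
    intro i out hd hlen hrows hi
    have : i = n := by omega
    rw [pvAOuter]
    simp [this, List.take_of_length_le (le_of_eq hlen)]
  | succ d ih =>
    intro i out hd hlen hrows hi
    have hin : i < n := by omega
    have hrow : (out.getD i []).length = n := by
      have hmem : out.getD i [] ∈ out := by
        have : i < out.length := by omega
        rw [List.getD_eq_getElem _ _ this]
        exact List.getElem_mem this
      exact hrows _ hmem
    have hinner : pvAInner s n i 0 (out.getD i []) = (List.range n).map (pvVal s n i) := by
      rw [pvAInner_eq s n i n 0 _ (by omega) hrow (by omega)]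
      simp
    rw [pvAOuter]
    simp only [hin, dif_pos, hinner]
    rw [ih (i+1) _ (by omega) (by simp [hlen])
        (by
          intro r hr
          rcases List.mem_or_eq_of_mem_set hr with h | h
          · exact hrows _ h
          · rw [h]; simp)
        (by omega)]
    have hset : out.set i ((List.range n).map (pvVal s n i))
        = out.take i ++ (List.range n).map (pvVal s n i) :: out.drop (i+1) := by
      rw [List.set_eq_take_append_cons_drop, if_pos (by omega)]
    rw [hset]
    have htake : (out.take i ++ (List.range n).map (pvVal s n i) :: out.drop (i+1)).take (i+1)
        = out.take i ++ [(List.range n).map (pvVal s n i)] := by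
      have hlt : (out.take i).length = i := by simp [List.length_take, hlen]; omega
      rw [show i + 1 = (out.take i).length + 1 by omega, List.take_append]
      simp
    rw [htake, List.range_succ_eq_map, List.map_cons, List.map_map]
    simp only [List.append_assoc, List.cons_append, List.nil_append, Nat.add_zero]
    congr 2
    apply List.map_congr_left
    intro k _
    simp only [Function.comp]
    have h2 : i + 1 + k = i + (k + 1) := by omega
    rw [h2]

-- B's row i equals the row A fills, for i < n = (len+1)/2
theorem pvRow_eq (s : List Int) (n i : Nat) (hn : n = (s.length + 1) / 2) (hi : i < n) :
    (PySem.List.slice s (some (n : Int)) (some ((n : Int) + (i : Int)))).reverse ++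
      PySem.List.slice s none (some ((n : Int) - (i : Int)))
      = (List.range n).map (pvVal s n i) := by
  have hL : 2 * n - 1 ≤ s.length := by omega
  have hn1 : 1 ≤ n := by omega
  have hnL : n ≤ s.length := by omega
  rw [PySem.List.slice_natCast_add]
  have hcast : (n : Int) - (i : Int) = ((n - i : Nat) : Int) := by omega
  rw [hcast, PySem.List.slice_to_natCast]
  have hlen1 : ((s.drop n).take i).length = i := by
    simp [List.length_take, List.length_drop]; omega
  have hlen2 : (s.take (n - i)).length = n - i := by
    simp [List.length_take]; omega
  apply List.ext_getElem
  · simp [hlen1, hlen2]; omega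
  · intro j hj1 hj2
    have hjn : j < n := by simpa using hj2
    simp only [List.getElem_map, List.getElem_range]
    by_cases hij : j < i
    · -- reversed slice part: s[n - 1 + i - j]
      have hidx : j < (((s.drop n).take i).reverse).length := by simp [hlen1]; omega
      rw [List.getElem_append_left hidx]
      rw [List.getElem_reverse]
      rw [List.getElem_take, List.getElem_drop]
      unfold pvVal
      have : ¬ i ≤ j := by omega
      rw [if_neg this]
      have hcast2 : (n : Int) - 1 + (i : Int) - (j : Int)
          = ((n + (i - 1 - j) : Nat) : Int) := by omega
      rw [hcast2, PySem.List.pyGetD_natCast]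
      rw [List.getD_eq_getElem _ _ (by omega)]
      simp only [hlen1]
    · -- take part: s[j - i]
      have hlenrev : (((s.drop n).take i).reverse).length = i := by simp [hlen1]
      rw [List.getElem_append_right (by omega)]
      rw [List.getElem_take]
      unfold pvVal
      rw [if_pos (by omega)]
      have hcast2 : (j : Int) - (i : Int) = ((j - i : Nat) : Int) := by omega
      rw [hcast2, PySem.List.pyGetD_natCast]
      rw [List.getD_eq_getElem _ _ (by omega)]
      congr 1
      simp only [hlenrev]

-- ===== VERDICT (by name: the statement is the Claim_ definition above) =====
theorem convertSingleToDiagonalMatrix_spec : Claim_equal_convertSingleToDiagonalMatrix := by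
  intro s _
  unfold Spec_convertSingleToDiagonalMatrix convertSingleToDiagonalMatrix convertSingleToDiagonalMatrix_alt
  set n := (s.length + 1) / 2 with hn
  rw [pvAOuter_eq s n n 0 _ (by omega) (by simp) (by intro r hr; simp_all [List.eq_of_mem_replicate hr]) (by omega)]
  simp only [List.take_zero, List.nil_append, zero_add]
  apply List.map_congr_left
  intro i hi
  rw [pvRow_eq s n i hn (List.mem_range.mp hi)]
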